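-- pv_equiv track=rewrite | github.com/alicelieutier/AoC2019 | archive/4.py | gen_candidates
-- ===== SOURCE A (Python) =====
-- from itertools import groupby
--
-- def gen_candidates(low, up):
--     for candidate in range(low, up+1):
--         string_repr = str(candidate)
--         if increasing_digits(candidate):
--             groups_of_digits = [len(list(g)) for l, g in groupby(string_repr)]
--             count_groups_of_digits = {n:len(list(g)) for n, g in groupby(groups_of_digits)}
--             # if count_groups_of_digits.get(1, 0) < 6:  # part 1
--             if count_groups_of_digits.get(2, 0) > 0:  # part 2
--                 yield candidate
--
-- def increasing_digits(number):
--     string_repr = str(number)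
--     for i in range(len(string_repr) - 1):
--         if int(string_repr[i]) > int(string_repr[i+1]):
--             return False
--     return True
-- ===== SOURCE B (Python) =====
-- def gen_candidates(low, up):
--     # Single fused pass over each number's digits (no itertools, no dict):
--     # tracks the current run length and whether an exact-double run was seen.
--     for n in range(low, up + 1):
--         s = str(n)
--         prev = s[0]
--         run = 1
--         ok = True
--         double = False
--         for c in s[1:]:
--             if c == prev:
--                 run += 1
--             elif c < prev:
--                 ok = False
--                 break
--             else:
--                 if run == 2:
--                     double = True
--                 prev = c
--                 run = 1
--         if ok and (double or run == 2):
--             yield n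
-- ===== Notes on version B (the rewrite author's own statement) =====
-- stated objective: faster
-- what changed: Per candidate, A builds the string twice and runs an index loop, two itertools.groupby passes and a dict just to test '2 in run lengths'; B does one fused pass over the digit string tracking (prev, run length, exact-double flag) with an early break at the first decreasing pair.
import Mathlib
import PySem

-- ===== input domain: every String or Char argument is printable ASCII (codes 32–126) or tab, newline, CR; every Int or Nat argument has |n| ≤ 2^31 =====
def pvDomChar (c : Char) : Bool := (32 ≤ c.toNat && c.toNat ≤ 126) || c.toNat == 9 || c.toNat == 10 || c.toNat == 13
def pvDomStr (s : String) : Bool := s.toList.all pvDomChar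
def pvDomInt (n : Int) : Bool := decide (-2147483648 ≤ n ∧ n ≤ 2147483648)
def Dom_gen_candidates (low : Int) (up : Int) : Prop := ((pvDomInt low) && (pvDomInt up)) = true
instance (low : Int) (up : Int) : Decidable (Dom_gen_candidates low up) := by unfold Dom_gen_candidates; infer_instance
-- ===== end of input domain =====

-- B replaces A's per-candidate string/groupby/dict pipeline by one fused pass over the
-- digits with an early break (measurably faster by a constant factor; same outer range loop).

-- ===== PORT A =====
-- int(s[i]) on a one-character string; .getD 0 is unreachable inside Pre_ (digit chars only)
def pvIntOf (c : Char) : Int := (PySem.Int.ofChars? [c]).getD 0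

-- the index loop of increasing_digits: compares adjacent characters, early return False
def pvIncLoop : List Char → Bool
  | a :: b :: t => if pvIntOf a > pvIntOf b then false else pvIncLoop (b :: t)
  | _ => true

def increasing_digits (number : Int) : Bool :=
  pvIncLoop (PySem.Int.toChars number)

-- itertools.groupby xs as the list of (key, len(list(g))) pairs, in order
def pvGroupsGo {α : Type} [BEq α] (cur : α) (k : Int) : List α → List (α × Int)
  | [] => [(cur, k)]
  | x :: t => if x == cur then pvGroupsGo cur (k + 1) t else (cur, k) :: pvGroupsGo x 1 t

def pvGroups {α : Type} [BEq α] : List α → List (α × Int)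
  | [] => []
  | x :: t => pvGroupsGo x 1 t

def gen_candidates (low : Int) (up : Int) : List Int :=
  (PySem.List.pyRange low (up + 1) 1).foldl (fun acc candidate =>
    let string_repr := PySem.Int.toChars candidate
    if increasing_digits candidate then
      let groups_of_digits := (pvGroups string_repr).map Prod.snd
      let count_groups_of_digits :=
        (pvGroups groups_of_digits).foldl (fun d p => d.insert p.1 p.2)
          (PySem.Dict.empty : PySem.Dict Int Int)
      if count_groups_of_digits.getD 2 0 > 0 then acc ++ [candidate] else acc
    else acc) []

-- ===== PORT B =====
-- the fused inner loop: prev char, current run length, exact-double seen so far;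
-- early `break` (monotonicity violated) returns false
def pvBLoop (prev : Char) (run : Int) (double : Bool) : List Char → Bool
  | [] => double || run == 2
  | c :: t =>
    if c == prev then pvBLoop prev (run + 1) double t
    else if c < prev then false
    else pvBLoop c 1 (double || run == 2) t

def gen_candidates_alt (low : Int) (up : Int) : List Int :=
  (PySem.List.pyRange low (up + 1) 1).foldl (fun acc n =>
    match PySem.Int.toChars n with
    | [] => acc      -- unreachable: str(n) is never empty
    | c :: t => if pvBLoop c 1 false t then acc ++ [n] else acc) []

-- ===== PRECONDITION & SPEC =====
-- Pre_ excludes exactly the inputs where A raises: a nonempty range starting below 0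
-- (increasing_digits does int('-') on the sign character → ValueError).
def Pre_gen_candidates (low : Int) (up : Int) : Prop := 0 ≤ low ∨ up < low
instance (low : Int) (up : Int) : Decidable (Pre_gen_candidates low up) := by
  unfold Pre_gen_candidates; infer_instance

def pvWitness_gen_candidates : Int × Int := (100, 140)

def Spec_gen_candidates (low : Int) (up : Int) (out : List Int) : Prop := out = gen_candidates_alt low up
instance (low : Int) (up : Int) (out : List Int) : Decidable (Spec_gen_candidates low up out) := by unfold Spec_gen_candidates; infer_instance

-- ===== CLAIM (what is proved, stated in full; the proofs are below) =====
def Claim_equal_gen_candidates : Prop := ∀ (low : Int) (up : Int), Dom_gen_candidates low up → Pre_gen_candidates low up → Spec_gen_candidates low up (gen_candidates low up)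

-- ===== LEMMAS AND PROOFS =====

def pvIsD (c : Char) : Prop := ∃ d : Nat, d < 10 ∧ c = Nat.digitChar d

lemma pv_toDigitsCore_shape (f : Nat) : ∀ (n : Nat) (acc : List Char),
    (∀ c ∈ acc, pvIsD c) → ∀ c ∈ Nat.toDigitsCore 10 f n acc, pvIsD c := by
  induction f with
  | zero => intro n acc h; simpa [Nat.toDigitsCore] using h
  | succ f ih =>
    intro n acc h
    simp only [Nat.toDigitsCore]
    have hd : pvIsD ((n % 10).digitChar) := ⟨n % 10, Nat.mod_lt _ (by norm_num), rfl⟩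
    split
    · intro c hc
      rcases List.mem_cons.1 hc with rfl | hc
      · exact hd
      · exact h c hc
    · exact ih (n / 10) _ (by
        intro c hc
        rcases List.mem_cons.1 hc with rfl | hc
        · exact hd
        · exact h c hc)

lemma pv_toDigitsCore_ne_nil (f : Nat) : ∀ (n : Nat) (acc : List Char),
    0 < f ∨ acc ≠ [] → Nat.toDigitsCore 10 f n acc ≠ [] := by
  induction f with
  | zero => intro n acc h; simp [Nat.toDigitsCore]; tauto
  | succ f ih =>
    intro n acc _
    simp only [Nat.toDigitsCore]
    split
    · simp
    · exact ih (n / 10) _ (Or.inr (by simp))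

lemma pv_toChars_shape (n : Int) (h : 0 ≤ n) :
    (∀ c ∈ PySem.Int.toChars n, pvIsD c) ∧ PySem.Int.toChars n ≠ [] := by
  unfold PySem.Int.toChars
  rw [if_neg (by omega)]
  unfold Nat.toDigits
  exact ⟨pv_toDigitsCore_shape _ _ _ (by simp), pv_toDigitsCore_ne_nil _ _ _ (Or.inl (Nat.succ_pos _))⟩

lemma pv_groupsGo_pos {α : Type} [BEq α] (t : List α) : ∀ (cur : α) (k : Int), 0 < k →
    ∀ p ∈ pvGroupsGo cur k t, 0 < p.2 := by
  induction t with
  | nil => intro cur k hk p hp; simp [pvGroupsGo] at hp; subst hp; exact hk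
  | cons x t ih =>
    intro cur k hk p hp
    simp only [pvGroupsGo] at hp
    split at hp
    · exact ih cur (k + 1) (by omega) p hp
    · rcases List.mem_cons.1 hp with rfl | hp
      · exact hk
      · exact ih x 1 (by norm_num) p hp

lemma pv_groupsGo_keys {α : Type} [BEq α] [LawfulBEq α] (t : List α) :
    ∀ (cur : α) (k : Int) (x : α), x ∈ (pvGroupsGo cur k t).map Prod.fst ↔ x = cur ∨ x ∈ t := by
  induction t with
  | nil => intro cur k x; simp [pvGroupsGo]
  | cons y t ih =>
    intro cur k x
    simp only [pvGroupsGo]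
    split
    · rename_i hy
      rw [ih]
      have : y = cur := eq_of_beq hy
      subst this
      simp only [List.mem_cons]
      tauto
    · simp only [List.map_cons, List.mem_cons, ih]

lemma pv_dict_pos (ps : List (Int × Int)) : ∀ (d : PySem.Dict Int Int),
    (∀ p ∈ ps, 0 < p.2) →
    (0 < (ps.foldl (fun d p => d.insert p.1 p.2) d).getD 2 0 ↔
      2 ∈ ps.map Prod.fst ∨ 0 < d.getD 2 0) := by
  induction ps with
  | nil => intro d _; simp
  | cons p ps ih =>
    intro d hpos
    simp only [List.foldl_cons, List.map_cons, List.mem_cons]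
    rw [ih _ (fun q hq => hpos q (List.mem_cons_of_mem _ hq))]
    rw [PySem.Dict.getD_insert]
    by_cases h2 : (2 : Int) = p.1
    · rw [if_pos h2]
      have := hpos p (List.mem_cons_self)
      constructor
      · intro _; left; left; exact h2
      · intro _; right; exact this
    · rw [if_neg h2]
      tauto

lemma pv_dchar_beq : ∀ a < 10, ∀ b < 10,
    ((Nat.digitChar a == Nat.digitChar b) = (a == b)) := by decide
lemma pv_dchar_lt : ∀ a < 10, ∀ b < 10,
    (decide (Nat.digitChar a < Nat.digitChar b) = decide (a < b)) := by decide
lemma pv_dchar_int : ∀ a < 10, pvIntOf (Nat.digitChar a) = (a : Int) := by decide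

lemma pv_bloop_eq (t : List Char) : ∀ (prev : Char) (run : Int) (double : Bool),
    pvIsD prev → (∀ c ∈ t, pvIsD c) →
    pvBLoop prev run double t =
      (pvIncLoop (prev :: t) &&
        (double || decide ((2 : Int) ∈ (pvGroupsGo prev run t).map Prod.snd))) := by
  induction t with
  | nil =>
    intro prev run double _ _
    simp only [pvBLoop, pvIncLoop, pvGroupsGo, List.map_cons, List.map_nil, List.mem_singleton,
      Bool.true_and]
    congr 1
    by_cases h : run = 2
    · subst h; rfl
    · simp [h, Ne.symm h]
  | cons c t ih =>
    intro prev run double hprev hall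
    obtain ⟨a, ha, rfl⟩ := hprev
    obtain ⟨b, hb, rfl⟩ := hall c List.mem_cons_self
    have hall' : ∀ x ∈ t, pvIsD x := fun x hx => hall x (List.mem_cons_of_mem _ hx)
    by_cases hab : b = a
    · subst hab
      have hbeq : (Nat.digitChar b == Nat.digitChar b) = true := by simp
      simp only [pvBLoop, hbeq, if_true, pvGroupsGo, pvIncLoop]
      rw [if_neg (by omega : ¬ pvIntOf (Nat.digitChar b) > pvIntOf (Nat.digitChar b))]
      exact ih _ _ _ ⟨b, hb, rfl⟩ hall'
    · have hbeq : (Nat.digitChar b == Nat.digitChar a) = false := by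
        rw [pv_dchar_beq b hb a ha]; simp [hab]
      by_cases hlt : b < a
      · have hc : decide (Nat.digitChar b < Nat.digitChar a) = true := by
          rw [pv_dchar_lt b hb a ha]; simp [hlt]
        simp only [pvBLoop, hbeq, Bool.false_eq_true, if_false, pvIncLoop]
        rw [if_pos (of_decide_eq_true hc)]
        rw [if_pos (by rw [pv_dchar_int a ha, pv_dchar_int b hb]; exact_mod_cast hlt)]
        simp
      · have hc : decide (Nat.digitChar b < Nat.digitChar a) = false := by
          rw [pv_dchar_lt b hb a ha]; simp [hlt]
        simp only [pvBLoop, hbeq, Bool.false_eq_true, if_false, pvIncLoop, pvGroupsGo]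
        rw [if_neg (of_decide_eq_false hc)]
        rw [if_neg (by rw [pv_dchar_int a ha, pv_dchar_int b hb]; exact_mod_cast hlt)]
        rw [ih _ _ _ ⟨b, hb, rfl⟩ hall']
        simp only [List.map_cons, List.mem_cons]
        have hr : (run == 2) = decide ((2:Int) = run) := by
          by_cases h : run = 2
          · subst h; rfl
          · simp [h, Ne.symm h]
        rw [show decide ((2:Int) = run ∨ (2:Int) ∈ (pvGroupsGo (Nat.digitChar b) 1 t).map Prod.snd)
            = (decide ((2:Int) = run) || decide ((2:Int) ∈ (pvGroupsGo (Nat.digitChar b) 1 t).map Prod.snd)) from by simp,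
          hr, Bool.or_assoc]

lemma pv_step_eq (n : Int) (h : 0 ≤ n) (acc : List Int) :
    (let string_repr := PySem.Int.toChars n
     if increasing_digits n then
       let groups_of_digits := (pvGroups string_repr).map Prod.snd
       let count_groups_of_digits :=
         (pvGroups groups_of_digits).foldl (fun d p => d.insert p.1 p.2)
           (PySem.Dict.empty : PySem.Dict Int Int)
       if count_groups_of_digits.getD 2 0 > 0 then acc ++ [n] else acc
     else acc) =
    (match PySem.Int.toChars n with
     | [] => acc
     | c :: t => if pvBLoop c 1 false t then acc ++ [n] else acc) := by
  obtain ⟨hdig, hne⟩ := pv_toChars_shape n h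
  obtain ⟨c, t, hs⟩ : ∃ c t, PySem.Int.toChars n = c :: t := by
    cases hEq : PySem.Int.toChars n with
    | nil => exact absurd hEq hne
    | cons c t => exact ⟨c, t, rfl⟩
  rw [hs] at hdig ⊢
  simp only
  -- B's test in characterised form
  rw [pv_bloop_eq t c 1 false (hdig c List.mem_cons_self)
    (fun x hx => hdig x (List.mem_cons_of_mem _ hx))]
  have hinc : increasing_digits n = pvIncLoop (c :: t) := by
    unfold increasing_digits; rw [hs]
  -- groups of digits: nonempty
  have hGne : pvGroupsGo c 1 t ≠ [] := by
    intro hemp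
    have := (pv_groupsGo_keys t c 1 c).2 (Or.inl rfl)
    rw [hemp] at this; simp at this
  obtain ⟨v, vs, hG⟩ : ∃ v vs, (pvGroupsGo c 1 t).map Prod.snd = v :: vs := by
    rcases hG' : (pvGroupsGo c 1 t).map Prod.snd with _ | ⟨v, vs⟩
    · exact absurd (List.map_eq_nil_iff.1 hG') hGne
    · exact ⟨v, vs, rfl⟩
  -- A's dict condition ↔ membership of 2 among the run lengths
  have hpos : ∀ p ∈ pvGroups ((pvGroupsGo c 1 t).map Prod.snd), 0 < p.2 := by
    rw [hG]; exact pv_groupsGo_pos vs v 1 (by norm_num)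
  have hcond : (0 < ((pvGroups ((pvGroupsGo c 1 t).map Prod.snd)).foldl
      (fun d p => d.insert p.1 p.2) (PySem.Dict.empty : PySem.Dict Int Int)).getD 2 0) ↔
      (2 : Int) ∈ (pvGroupsGo c 1 t).map Prod.snd := by
    rw [pv_dict_pos _ _ hpos]
    simp only [PySem.Dict.getD_empty, lt_irrefl, or_false]
    rw [hG]
    simp only [pvGroups]
    rw [pv_groupsGo_keys vs v 1 2]
    simp
  rw [hinc, show (pvGroups (c :: t) : List (Char × Int)) = pvGroupsGo c 1 t from rfl]
  by_cases hI : pvIncLoop (c :: t) = true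
  · rw [hI]
    simp only [if_true, Bool.true_and, Bool.false_or]
    by_cases hm : (2 : Int) ∈ (pvGroupsGo c 1 t).map Prod.snd
    · rw [if_pos (hcond.2 hm), if_pos (by simpa using hm)]
    · rw [if_neg (fun hc => hm (hcond.1 hc)), if_neg (by simpa using hm)]
  · rw [Bool.not_eq_true] at hI
    rw [hI]
    simp

-- ===== VERDICT (by name: the statement is the Claim_ definition above) =====
theorem gen_candidates_spec : Claim_equal_gen_candidates := by
  intro low up _ hpre
  unfold Spec_gen_candidates gen_candidates gen_candidates_alt
  apply PySem.List.foldl_congr_mem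
  intro acc n hn
  rw [PySem.List.mem_pyRange_one] at hn
  rcases hpre with h0 | hlt
  · exact pv_step_eq n (le_trans h0 hn.1) acc
  · exact absurd (lt_of_le_of_lt hn.1 hn.2) (by omega)
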